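-- pv_equiv track=rewrite | github.com/zhoujt1994/scHiCluster | schicluster/scool/__init__.py | get_chrom_offsets
-- ===== SOURCE A (Python) =====
-- def get_chrom_offsets(chrom_sizes_series, resolution):
--     cur_offset = 0
--     chrom_offset = {}
--     for chrom, length in chrom_sizes_series.items():
--         chrom_offset[chrom] = cur_offset
--         n_bins = length // resolution + 1 * (length % resolution != 0)
--         cur_offset += n_bins
--     return chrom_offset
-- ===== SOURCE B (Python) =====
-- from itertools import accumulate
--
--
-- def get_chrom_offsets(chrom_sizes_series, resolution):
--     chroms = []
--     bins = []
--     for chrom, length in chrom_sizes_series.items():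
--         chroms.append(chrom)
--         bins.append(length // resolution + (length % resolution != 0))
--     offsets = list(accumulate(bins, initial=0))[:-1]
--     return dict(zip(chroms, offsets))
-- ===== Notes on version B (the rewrite author's own statement) =====
-- stated objective: alternative
-- what changed: Instead of threading a running offset through one dict-building loop, B first collects per-chromosome bin counts, computes the offsets as an exclusive prefix sum with itertools.accumulate, and builds the dict once with dict(zip(...)).
import Mathlib
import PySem

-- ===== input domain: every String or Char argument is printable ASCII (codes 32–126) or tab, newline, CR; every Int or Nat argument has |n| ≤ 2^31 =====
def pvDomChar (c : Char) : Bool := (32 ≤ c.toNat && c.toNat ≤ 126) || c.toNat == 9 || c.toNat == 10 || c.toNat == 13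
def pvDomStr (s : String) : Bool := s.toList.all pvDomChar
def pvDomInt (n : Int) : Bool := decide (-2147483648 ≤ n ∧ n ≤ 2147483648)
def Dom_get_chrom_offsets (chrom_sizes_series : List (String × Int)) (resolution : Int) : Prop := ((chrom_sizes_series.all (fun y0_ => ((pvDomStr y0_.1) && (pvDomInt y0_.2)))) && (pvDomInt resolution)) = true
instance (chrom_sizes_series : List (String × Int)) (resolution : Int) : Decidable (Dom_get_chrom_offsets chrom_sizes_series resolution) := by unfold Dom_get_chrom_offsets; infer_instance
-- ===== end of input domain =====

-- B computes per-chromosome bin counts first, then the offsets as an exclusive prefix sum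
-- (itertools.accumulate), then builds the dict once with dict(zip(...)); same O(n) cost, different decomposition.

-- ===== PORT A =====
-- one loop threading (dict, running offset)
def get_chrom_offsets (chrom_sizes_series : List (String × Int)) (resolution : Int) : List (String × Int) :=
  (chrom_sizes_series.foldl
    (fun (st : PySem.Dict String Int × Int) p =>
      let d := st.1.insert p.1 st.2
      let n_bins := PySem.Int.floordiv p.2 resolution +
        1 * (if PySem.Int.mod p.2 resolution ≠ 0 then 1 else 0)
      (d, st.2 + n_bins))
    (PySem.Dict.empty, 0)).1.items

-- ===== PORT B =====
-- bin counts, exclusive prefix sum (accumulate(..., initial=0)[:-1] = scanl dropping the last), dict(zip(...))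
def get_chrom_offsets_alt (chrom_sizes_series : List (String × Int)) (resolution : Int) : List (String × Int) :=
  let chroms := chrom_sizes_series.map (·.1)
  let bins := chrom_sizes_series.map
    (fun p => PySem.Int.floordiv p.2 resolution +
      (if PySem.Int.mod p.2 resolution ≠ 0 then (1 : Int) else 0))
  let offsets := (bins.scanl (· + ·) 0).dropLast
  ((chroms.zip offsets).foldl
    (fun (d : PySem.Dict String Int) p => d.insert p.1 p.2) PySem.Dict.empty).items

-- ===== PRECONDITION & SPEC =====
-- resolution = 0 makes Python's '//' and '%' raise ZeroDivisionError in A (and in B); nothing else is excluded.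
def Pre_get_chrom_offsets (chrom_sizes_series : List (String × Int)) (resolution : Int) : Prop :=
  resolution ≠ 0
instance (chrom_sizes_series : List (String × Int)) (resolution : Int) : Decidable (Pre_get_chrom_offsets chrom_sizes_series resolution) := by unfold Pre_get_chrom_offsets; infer_instance
def pvWitness_get_chrom_offsets : (List (String × Int)) × Int := ([("chr1", 5), ("chr2", 0)], 2)

def Spec_get_chrom_offsets (chrom_sizes_series : List (String × Int)) (resolution : Int) (out : List (String × Int)) : Prop := out = get_chrom_offsets_alt chrom_sizes_series resolution
instance (chrom_sizes_series : List (String × Int)) (resolution : Int) (out : List (String × Int)) : Decidable (Spec_get_chrom_offsets chrom_sizes_series resolution out) := by unfold Spec_get_chrom_offsets; infer_instance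

-- ===== CLAIM (what is proved, stated in full; the proofs are below) =====
def Claim_equal_get_chrom_offsets : Prop := ∀ (chrom_sizes_series : List (String × Int)) (resolution : Int), Dom_get_chrom_offsets chrom_sizes_series resolution → Pre_get_chrom_offsets chrom_sizes_series resolution → Spec_get_chrom_offsets chrom_sizes_series resolution (get_chrom_offsets chrom_sizes_series resolution)

-- ===== LEMMAS AND PROOFS =====

-- A's threaded fold equals B's zip-with-prefix-sums fold, generalized over the accumulator.
theorem pv_fold_eq (resolution : Int) :
    ∀ (xs : List (String × Int)) (d : PySem.Dict String Int) (c : Int),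
      (xs.foldl
        (fun (st : PySem.Dict String Int × Int) p =>
          (st.1.insert p.1 st.2,
           st.2 + (PySem.Int.floordiv p.2 resolution +
             1 * (if PySem.Int.mod p.2 resolution ≠ 0 then 1 else 0))))
        (d, c)).1
      = (((xs.map (·.1)).zip
            (((xs.map (fun p => PySem.Int.floordiv p.2 resolution +
               (if PySem.Int.mod p.2 resolution ≠ 0 then (1 : Int) else 0))).scanl (· + ·) c).dropLast)).foldl
          (fun (d : PySem.Dict String Int) p => d.insert p.1 p.2) d) := by
  intro xs
  induction xs with
  | nil => intro d c; simp
  | cons p t ih =>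
    intro d c
    have hne : ∀ (l : List Int) (a : Int), (l.scanl (· + ·) a) ≠ [] := by
      intro l a
      cases l <;> simp [List.scanl_nil, List.scanl_cons]
    simp only [List.foldl_cons, List.map_cons, List.scanl_cons]
    rw [List.dropLast_cons_of_ne_nil (hne _ _)]
    simp only [List.zip_cons_cons, List.foldl_cons]
    have := ih (d.insert p.1 c)
      (c + (PySem.Int.floordiv p.2 resolution +
        1 * (if PySem.Int.mod p.2 resolution ≠ 0 then 1 else 0)))
    rw [this]
    ring_nf

-- ===== VERDICT (by name: the statement is the Claim_ definition above) =====
theorem get_chrom_offsets_spec : Claim_equal_get_chrom_offsets := by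
  intro xs r _ _
  unfold Spec_get_chrom_offsets get_chrom_offsets get_chrom_offsets_alt
  simp only []
  rw [pv_fold_eq r xs PySem.Dict.empty 0]
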